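-- pv_equiv track=rewrite | github.com/NullCarrier/MyDemo | python_demo/convert2rknn.py | ignore_dim_with_zero
-- ===== SOURCE A (Python) =====
-- def ignore_dim_with_zero(_shape, _shape_target):
--     _shape = list(_shape)
--     _shape_target = list(_shape_target)
--     for i in range(_shape.count(1)):
--         _shape.remove(1)
--     for j in range(_shape_target.count(1)):
--         _shape_target.remove(1)
--     if _shape == _shape_target:
--         return True
--     else:
--         return False
-- ===== SOURCE B (Python) =====
-- def ignore_dim_with_zero(_shape, _shape_target):
--     # Two-pointer walk: skip dims equal to 1 on each side, compare the rest in one pass.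
--     i, j = 0, 0
--     n, m = len(_shape), len(_shape_target)
--     while True:
--         while i < n and _shape[i] == 1:
--             i += 1
--         while j < m and _shape_target[j] == 1:
--             j += 1
--         if i < n and j < m:
--             if _shape[i] != _shape_target[j]:
--                 return False
--             i += 1
--             j += 1
--         else:
--             return i == n and j == m
-- ===== Notes on version B (the rewrite author's own statement) =====
-- stated objective: faster
-- what changed: Replaces A's count-then-repeated-remove(1) passes over copies of both lists followed by a list comparison with a single two-pointer walk that skips dimensions equal to 1 on either side and compares the remaining elements in place, building no intermediate lists.
import Mathlib
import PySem

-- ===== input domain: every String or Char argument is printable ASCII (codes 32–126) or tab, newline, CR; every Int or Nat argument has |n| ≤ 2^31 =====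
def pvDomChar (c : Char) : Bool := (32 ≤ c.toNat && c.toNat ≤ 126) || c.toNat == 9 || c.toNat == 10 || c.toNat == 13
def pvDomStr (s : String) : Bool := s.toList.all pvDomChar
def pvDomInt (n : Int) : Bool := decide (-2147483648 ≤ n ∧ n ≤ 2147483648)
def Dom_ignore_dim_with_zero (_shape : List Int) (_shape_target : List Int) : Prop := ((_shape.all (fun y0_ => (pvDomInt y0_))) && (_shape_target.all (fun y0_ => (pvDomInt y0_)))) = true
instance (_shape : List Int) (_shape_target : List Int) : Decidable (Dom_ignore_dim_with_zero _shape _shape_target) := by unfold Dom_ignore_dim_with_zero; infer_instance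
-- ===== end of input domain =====

-- B replaces "remove every 1 from copies of both lists, then compare" by a single
-- two-pointer walk that skips 1s on either side and compares the remaining dims in place
-- (objective: alternative decomposition — no intermediate lists, one pass).

-- ===== PORT A =====
-- one iteration of `_shape.remove(1)`; on the executed iterations 1 is always present
def pvRemoveStep (l : List Int) : List Int :=
  match PySem.List.remove? l 1 with
  | some l' => l'
  | none => l

def ignore_dim_with_zero (_shape : List Int) (_shape_target : List Int) : Bool :=
  let s := (PySem.List.pyRange 0 (PySem.List.count _shape 1 : Int) 1).foldl
             (fun l _ => pvRemoveStep l) _shape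
  let t := (PySem.List.pyRange 0 (PySem.List.count _shape_target 1 : Int) 1).foldl
             (fun l _ => pvRemoveStep l) _shape_target
  if s = t then true else false

-- ===== PORT B =====
-- the two-pointer loop of Source B as recursion on the two suffixes at the pointers
def ignore_dim_with_zero_alt (_shape : List Int) (_shape_target : List Int) : Bool :=
  match _shape, _shape_target with
  | [], [] => true
  | [], y :: b => if y = 1 then ignore_dim_with_zero_alt [] b else false
  | x :: a, [] => if x = 1 then ignore_dim_with_zero_alt a [] else false
  | x :: a, y :: b =>
    if x = 1 then ignore_dim_with_zero_alt a (y :: b)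
    else if y = 1 then ignore_dim_with_zero_alt (x :: a) b
    else if x = y then ignore_dim_with_zero_alt a b else false
termination_by _shape.length + _shape_target.length

-- ===== PRECONDITION & SPEC =====
def Spec_ignore_dim_with_zero (_shape : List Int) (_shape_target : List Int) (out : Bool) : Prop := out = ignore_dim_with_zero_alt _shape _shape_target
instance (_shape : List Int) (_shape_target : List Int) (out : Bool) : Decidable (Spec_ignore_dim_with_zero _shape _shape_target out) := by unfold Spec_ignore_dim_with_zero; infer_instance

-- ===== CLAIM (what is proved, stated in full; the proofs are below) =====
def Claim_equal_ignore_dim_with_zero : Prop := ∀ (_shape : List Int) (_shape_target : List Int), Dom_ignore_dim_with_zero _shape _shape_target → Spec_ignore_dim_with_zero _shape _shape_target (ignore_dim_with_zero _shape _shape_target)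

-- ===== LEMMAS AND PROOFS =====

-- folding a constant-step function over a list is iteration, length-many times
theorem pvFoldl_const_iterate {α β : Type} (f : α → α) (r : List β) (a : α) :
    r.foldl (fun x _ => f x) a = f^[r.length] a := by
  induction r generalizing a with
  | nil => rfl
  | cons h t ih => simp [List.foldl_cons, ih, Function.iterate_succ_apply]

theorem pvFilterEraseOne (l : List Int) :
    (l.erase 1).filter (fun x => !(x == 1)) = l.filter (fun x => !(x == 1)) := by
  induction l with
  | nil => rfl
  | cons h t ih =>
    by_cases h1 : h = 1
    · subst h1; simp
    · simp [h1, ih]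

-- iterating remove(1) count-many times is filtering out the 1s
theorem pvIterRemove (n : Nat) : ∀ (l : List Int), PySem.List.count l 1 = n →
    pvRemoveStep^[n] l = l.filter (fun x => !(x == 1)) := by
  induction n with
  | zero =>
    intro l hc
    rw [PySem.List.count_eq] at hc
    have hnm : (1 : Int) ∉ l := by
      intro hm; have := List.count_pos_iff.mpr hm; omega
    simp [Function.iterate_zero]
    symm
    rw [List.filter_eq_self]
    intro a ha
    simp only [Bool.not_eq_eq_eq_not, Bool.not_true, beq_eq_false_iff_ne]
    exact fun h => hnm (h ▸ ha)
  | succ k ih =>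
    intro l hc
    have hmem : (1 : Int) ∈ l := by
      rw [PySem.List.count_eq] at hc
      by_contra hnm
      simp [List.count_eq_zero_of_not_mem hnm] at hc
    have hstep : pvRemoveStep l = l.erase 1 := by
      unfold pvRemoveStep
      rw [PySem.List.remove?_eq_some_erase l 1 hmem]
    have hcount : PySem.List.count (l.erase 1) 1 = k := by
      rw [PySem.List.count_eq] at hc ⊢
      rw [List.count_erase_self]; omega
    rw [Function.iterate_succ_apply, hstep, ih _ hcount, pvFilterEraseOne]

-- A computes: filter both lists, compare
theorem pvA_eq_filter (s t : List Int) :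
    ignore_dim_with_zero s t =
      decide (s.filter (fun x => !(x == 1)) = t.filter (fun x => !(x == 1))) := by
  unfold ignore_dim_with_zero
  have hlen : ∀ (n : Nat), (PySem.List.pyRange 0 (n : Int) 1).length = n := by
    intro n; rw [PySem.List.length_pyRange_one]; simp
  rw [pvFoldl_const_iterate, pvFoldl_const_iterate, hlen, hlen,
      pvIterRemove _ s rfl, pvIterRemove _ t rfl]
  by_cases h : s.filter (fun x => !(x == 1)) = t.filter (fun x => !(x == 1)) <;> simp [h]

-- B computes the same comparison by its two-pointer recursion
theorem pvB_eq_filter (s t : List Int) :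
    ignore_dim_with_zero_alt s t =
      decide (s.filter (fun x => !(x == 1)) = t.filter (fun x => !(x == 1))) := by
  fun_induction ignore_dim_with_zero_alt s t <;>
    simp_all [List.filter_cons]
-- ===== VERDICT (by name: the statement is the Claim_ definition above) =====
theorem ignore_dim_with_zero_spec : Claim_equal_ignore_dim_with_zero := by
  intro s t _
  unfold Spec_ignore_dim_with_zero
  rw [pvA_eq_filter, pvB_eq_filter]
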